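-- pv_equiv track=rewrite | github.com/ju-hu-sang/codingtest | 프로그래머스/0/120921. 문자열 밀기/문자열 밀기.py | solution
-- ===== SOURCE A (Python) =====
-- def solution(A, B):
--     cnt = 0
--     if A==B :
--         return 0
--     for i in range(1,len(A)+1):
--         cnt +=1
--         C = A[-i:] + A[:-i]
--         if C == B :
--             return cnt
--     if cnt == len(A):
--         return -1
-- ===== SOURCE B (Python) =====
-- def solution(A, B):
--     if A == B:
--         return 0
--     if len(A) != len(B):
--         return -1
--     ra = A[::-1]
--     # smallest right-shift count = first occurrence of reversed B in doubled reversed A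
--     return (ra + ra).find(B[::-1])
-- ===== Notes on version B (the rewrite author's own statement) =====
-- stated objective: faster
-- what changed: Replaces the O(n^2) loop that rebuilds and compares every rotation with a single substring search: the smallest right-shift turning A into B is the first occurrence of reversed B in the doubled reversed A.
import Mathlib
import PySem

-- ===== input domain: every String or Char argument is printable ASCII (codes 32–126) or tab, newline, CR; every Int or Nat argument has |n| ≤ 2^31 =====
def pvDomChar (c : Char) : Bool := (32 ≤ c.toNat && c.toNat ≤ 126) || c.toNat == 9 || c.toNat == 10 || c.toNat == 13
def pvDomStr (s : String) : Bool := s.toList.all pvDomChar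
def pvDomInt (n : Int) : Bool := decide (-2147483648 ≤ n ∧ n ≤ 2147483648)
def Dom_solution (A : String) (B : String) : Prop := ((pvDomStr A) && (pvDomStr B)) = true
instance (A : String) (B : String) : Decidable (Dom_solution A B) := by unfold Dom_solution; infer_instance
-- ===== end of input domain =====

-- B replaces A's O(n^2) rotate-and-compare loop with one substring search on the doubled
-- reversed string (objective: faster, asymptotically).

-- ===== PORT A =====
-- the for-loop: i runs over range(1, len(A)+1), cnt is incremented each step; returns cnt on match.
-- After an exhausted loop Python's guard `cnt == len(A)` always holds (cnt was incremented
-- len(A) times), so the exhausted case returns -1 (the None branch is unreachable).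
def solutionGo (al bl : List Char) : List Int → Int → Int
  | [], _ => -1
  | i :: rest, cnt =>
      let cnt' := cnt + 1
      let C := PySem.Chars.slice al (some (-i)) none ++ PySem.Chars.slice al none (some (-i))
      if C = bl then cnt' else solutionGo al bl rest cnt'

def solution (A : String) (B : String) : Int :=
  if A == B then 0
  else solutionGo A.toList B.toList (PySem.List.pyRange 1 ((PySem.Str.len A : Int) + 1) 1) 0

-- ===== PORT B =====
-- A[::-1] is ported as List.reverse; (ra+ra).find(B[::-1]) as PySem.Chars.find.
def solution_alt (A : String) (B : String) : Int :=
  if A == B then 0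
  else if PySem.Str.len A ≠ PySem.Str.len B then -1
  else
    let ra := A.toList.reverse
    PySem.Chars.find (ra ++ ra) B.toList.reverse

-- ===== PRECONDITION & SPEC =====
def Spec_solution (A : String) (B : String) (out : Int) : Prop := out = solution_alt A B
instance (A : String) (B : String) (out : Int) : Decidable (Spec_solution A B out) := by unfold Spec_solution; infer_instance

-- ===== CLAIM (what is proved, stated in full; the proofs are below) =====
def Claim_equal_solution : Prop := ∀ (A : String) (B : String), Dom_solution A B → Spec_solution A B (solution A B)

-- ===== LEMMAS AND PROOFS =====

-- the rotation A's loop builds at step i (1 ≤ i ≤ n), in drop/take form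
def pvRot (a : List Char) (j : Nat) : List Char := a.drop (a.length - j) ++ a.take (a.length - j)

theorem pv_length_rot (a : List Char) (j : Nat) : (pvRot a j).length = a.length := by
  simp [pvRot]

theorem pv_slice_from (a : List Char) (i : Nat) (h1 : 1 ≤ i) (h2 : i ≤ a.length) :
    PySem.Chars.slice a (some (-(i:Int))) none = a.drop (a.length - i) := by
  have hc : PySem.List.clampIdx a.length (-(i:Int)) = a.length - i := by
    simp only [PySem.List.clampIdx]
    split_ifs <;> omega
  simp only [PySem.Chars.slice_eq_listSlice, PySem.List.slice, hc]
  refine List.take_of_length_le ?_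
  simp only [List.length_drop]
  omega

theorem pv_slice_to (a : List Char) (i : Nat) (h1 : 1 ≤ i) (h2 : i ≤ a.length) :
    PySem.Chars.slice a none (some (-(i:Int))) = a.take (a.length - i) := by
  have hc : PySem.List.clampIdx a.length (-(i:Int)) = a.length - i := by
    simp only [PySem.List.clampIdx]
    split_ifs <;> omega
  simp [PySem.Chars.slice_eq_listSlice, PySem.List.slice, hc]

-- A's loop body at i computes the rotation pvRot a i
theorem pv_C_eq (a : List Char) (i : Nat) (h1 : 1 ≤ i) (h2 : i ≤ a.length) :
    PySem.Chars.slice a (some (-(i:Int))) none ++ PySem.Chars.slice a none (some (-(i:Int)))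
      = pvRot a i := by
  rw [pv_slice_from a i h1 h2, pv_slice_to a i h1 h2]; rfl

-- the length-n window of the doubled reversed a at offset p is the reversed p-rotation
theorem pv_window (a : List Char) (p : Nat) (hp : p ≤ a.length) :
    ((a.reverse ++ a.reverse).drop p).take a.length = (pvRot a p).reverse := by
  have h1 : a.reverse.drop p = (a.take (a.length - p)).reverse := by
    rw [List.reverse_take]
    congr 1
    omega
  rw [List.drop_append, h1]
  have hp0 : p - a.reverse.length = 0 := by simp; omega
  rw [hp0, List.drop_zero, List.take_append]
  rw [List.take_of_length_le (by simp only [List.length_reverse, List.length_take]; omega)]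
  have h3 : a.length - (a.take (a.length - p)).reverse.length = p := by
    simp only [List.length_reverse, List.length_take]; omega
  rw [h3]
  have h4 : a.reverse.take p = (a.drop (a.length - p)).reverse := by
    rw [List.reverse_drop]
    congr 1
    omega
  rw [h4, pvRot, List.reverse_append]

-- occurrence of reversed b at offset p in the doubled reversed a ↔ the p-step rotation is b
theorem pv_occ_iff (a b : List Char) (hlen : b.length = a.length) (hn : 0 < a.length) (p : Nat) :
    b.reverse <+: (a.reverse ++ a.reverse).drop p ↔ (p ≤ a.length ∧ pvRot a p = b) := by
  constructor
  · intro h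
    have hle := h.length_le
    simp at hle
    have hp : p ≤ a.length := by omega
    refine ⟨hp, ?_⟩
    rw [List.prefix_iff_eq_take] at h
    have : b.reverse.length = a.length := by simpa using hlen
    rw [this, pv_window a p hp] at h
    exact List.reverse_injective h.symm
  · rintro ⟨hp, hrot⟩
    rw [List.prefix_iff_eq_take]
    have : b.reverse.length = a.length := by simpa using hlen
    rw [this, pv_window a p hp, hrot]

-- loop with no matching step returns -1
theorem pv_go_none (al bl : List Char) (l : List Int) (cnt : Int)
    (h : ∀ i ∈ l, PySem.Chars.slice al (some (-i)) none ++ PySem.Chars.slice al none (some (-i)) ≠ bl) :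
    solutionGo al bl l cnt = -1 := by
  induction l generalizing cnt with
  | nil => rfl
  | cons i rest ih =>
      simp only [solutionGo]
      rw [if_neg (h i (by simp))]
      exact ih _ (fun j hj => h j (by simp [hj]))

-- loop over a failing prefix advances cnt by its length
theorem pv_go_append (al bl : List Char) (l1 l2 : List Int) (cnt : Int)
    (h : ∀ i ∈ l1, PySem.Chars.slice al (some (-i)) none ++ PySem.Chars.slice al none (some (-i)) ≠ bl) :
    solutionGo al bl (l1 ++ l2) cnt = solutionGo al bl l2 (cnt + l1.length) := by
  induction l1 generalizing cnt with
  | nil => simp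
  | cons i rest ih =>
      simp only [List.cons_append, solutionGo]
      rw [if_neg (h i (by simp))]
      rw [ih _ (fun j hj => h j (by simp [hj]))]
      congr 1
      simp only [List.length_cons]
      push_cast
      omega

-- ===== VERDICT (by name: the statement is the Claim_ definition above) =====
theorem solution_spec : Claim_equal_solution := by
  intro A B _
  unfold Spec_solution solution solution_alt
  by_cases hAB : A = B
  · simp [hAB]
  · rw [if_neg (by simpa using hAB), if_neg (by simpa using hAB)]
    set a := A.toList with ha
    set b := B.toList with hb
    have hab : a ≠ b := fun h => hAB (String.toList_inj.mp h)
    have hlenA : PySem.Str.len A = (a.length : Int) := by simp [PySem.Str.len, ha]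
    have hlenB : PySem.Str.len B = (b.length : Int) := by simp [PySem.Str.len, hb]
    by_cases hlen : PySem.Str.len A ≠ PySem.Str.len B
    · rw [if_pos hlen]
      apply pv_go_none
      intro i hi
      have hmem := (PySem.List.mem_pyRange_one.mp hi)
      have h1 : 1 ≤ i := hmem.1
      have h2 : i < (PySem.Str.len A : Int) + 1 := hmem.2
      rw [hlenA] at h2
      have hi1 : 1 ≤ i.toNat := by omega
      have hi2 : i.toNat ≤ a.length := by omega
      have hcast : i = (i.toNat : Int) := by omega
      rw [hcast, pv_C_eq a i.toNat hi1 hi2]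
      intro heq
      have := congrArg List.length heq
      rw [pv_length_rot] at this
      rw [hlenA, hlenB] at hlen
      exact hlen (by exact_mod_cast this)
    · rw [if_neg hlen]
      rw [not_not] at hlen
      rw [hlenA, hlenB] at hlen
      have hleq : b.length = a.length := by exact_mod_cast hlen.symm
      have hn : 0 < a.length := by
        rcases Nat.eq_zero_or_pos a.length with h0 | h
        · exfalso
          apply hab
          rw [List.eq_nil_of_length_eq_zero h0, List.eq_nil_of_length_eq_zero (by omega : b.length = 0)]
        · exact h
      set f := PySem.Chars.find (a.reverse ++ a.reverse) b.reverse with hf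
      by_cases hfneg : f = -1
      · rw [hfneg]
        apply pv_go_none
        intro i hi
        have hmem := (PySem.List.mem_pyRange_one.mp hi)
        have h1 : 1 ≤ i := hmem.1
        have h2 : i < (PySem.Str.len A : Int) + 1 := hmem.2
        rw [hlenA] at h2
        have hi1 : 1 ≤ i.toNat := by omega
        have hi2 : i.toNat ≤ a.length := by omega
        have hcast : i = (i.toNat : Int) := by omega
        rw [hcast, pv_C_eq a i.toNat hi1 hi2]
        intro heq
        have hnoinf := (PySem.Chars.find_eq_neg_one_iff _ _).mp hfneg
        apply hnoinf
        have hpre : b.reverse <+: (a.reverse ++ a.reverse).drop i.toNat :=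
          (pv_occ_iff a b hleq hn i.toNat).mpr ⟨hi2, heq⟩
        exact List.infix_iff_prefix_suffix.mpr ⟨_, hpre, List.drop_suffix _ _⟩
      · have hf0 : 0 ≤ f := by
          have := PySem.Chars.neg_one_le_find (a.reverse ++ a.reverse) b.reverse
          rw [← hf] at this
          omega
        obtain ⟨hpre, hmin⟩ := PySem.Chars.find_spec (sub := b.reverse) (s := a.reverse ++ a.reverse) (by rw [← hf]; exact hf0)
        rw [← hf] at hpre hmin
        set p := f.toNat with hp
        obtain ⟨hple, hrot⟩ := (pv_occ_iff a b hleq hn p).mp hpre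
        have hp1 : 1 ≤ p := by
          rcases Nat.eq_zero_or_pos p with h0 | h
          · exfalso
            rw [h0] at hrot
            apply hab
            simpa [pvRot] using hrot
          · exact h
        -- split the range at p
        have hsplit : PySem.List.pyRange 1 ((PySem.Str.len A : Int) + 1) 1
            = PySem.List.pyRange 1 (p : Int) 1 ++ PySem.List.pyRange (p : Int) ((PySem.Str.len A : Int) + 1) 1 := by
          apply PySem.List.pyRange_one_append
          · exact_mod_cast hp1
          · rw [hlenA]; omega
        rw [hsplit]
        rw [pv_go_append]
        · have hcons : PySem.List.pyRange (p : Int) ((PySem.Str.len A : Int) + 1) 1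
              = (p : Int) :: PySem.List.pyRange ((p : Int) + 1) ((PySem.Str.len A : Int) + 1) 1 := by
            apply PySem.List.pyRange_one_cons
            rw [hlenA]; exact_mod_cast Nat.lt_succ_of_le hple
          rw [hcons]
          simp only [solutionGo]
          rw [pv_C_eq a p hp1 hple, if_pos hrot]
          rw [PySem.List.length_pyRange_one]
          have : ((p : Int) - 1).toNat = p - 1 := by omega
          rw [this]
          omega
        · intro i hi
          have hmem := (PySem.List.mem_pyRange_one.mp hi)
          have h1 : 1 ≤ i := hmem.1
          have h2 : i < (p : Int) := hmem.2
          have hi1 : 1 ≤ i.toNat := by omega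
          have hi2 : i.toNat ≤ a.length := by omega
          have hcast : i = (i.toNat : Int) := by omega
          rw [hcast, pv_C_eq a i.toNat hi1 hi2]
          intro heq
          exact hmin i.toNat (by omega) ((pv_occ_iff a b hleq hn i.toNat).mpr ⟨hi2, heq⟩)
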